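-- pv_equiv track=rewrite | github.com/uos3/ground-sig-pro | turbo/turbo.py | component_encoder
-- ===== SOURCE A (Python) =====
-- def component_encoder(c):
--     state = 0
--     k = len(c)
--     z = [0]*k
--     for i in range(0,k):
--         state_nxt = state << 1
--         if c[i]:
--             state_nxt |= ((state >> 1) & 1) ^ ((state >> 2) & 1) ^ 1;
--         else:
--             state_nxt |= ((state >> 1) & 1) ^ ((state >> 2) & 1);
--         if ((state_nxt & 1) ^ (state & 1) ^ ((state >> 2) & 1)):
--             z[i] = 1
--         state = state_nxt
--
--     # get the termination
--     if  state&7 == 0: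
--         x_term = [0,0,0]
--         z_term = [0,0,0]
--     elif state&7 == 1:
--         x_term = [0,1,1]
--         z_term = [1,0,1]
--     elif state&7 == 2:
--         x_term = [1,1,0]
--         z_term = [0,1,0]
--     elif state&7 == 3:
--         x_term = [1,0,1]
--         z_term = [1,1,1]
--     elif state&7 == 4:
--         x_term = [1,0,0]
--         z_term = [1,0,0]
--     elif state&7 == 5:
--         x_term = [1,1,1]
--         z_term = [0,0,1]
--     elif state&7 == 6:
--         x_term = [0,1,0]
--         z_term = [1,1,0]
--     else: #state&7 == 7:
--         x_term = [0,0,1]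
--         z_term = [0,1,1]
--
--     return (z, x_term, z_term)
-- ===== SOURCE B (Python) =====
-- def component_encoder(c):
--     # 3-bit shift register kept explicitly; termination derived by flushing
--     # the register for 3 steps instead of an 8-way lookup table.
--     s = 0
--     z = []
--     for ci in c:
--         b0, b1, b2 = s & 1, (s >> 1) & 1, (s >> 2) & 1
--         fb = b1 ^ b2
--         newbit = fb ^ (1 if ci else 0)
--         z.append(newbit ^ b0 ^ b2)
--         s = ((s << 1) | newbit) & 7
--     x_term, z_term = [], []
--     for _ in range(3):
--         b0, b1, b2 = s & 1, (s >> 1) & 1, (s >> 2) & 1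
--         fb = b1 ^ b2
--         x_term.append(fb)
--         z_term.append(b0 ^ b2)
--         s = (s << 1) & 7
--     return (z, x_term, z_term)
-- ===== Notes on version B (the rewrite author's own statement) =====
-- stated objective: faster
-- what changed: B keeps the encoder state in an explicit 3-bit register (masked with &7 each step) instead of A's unboundedly growing shifted integer, and derives the termination bits by simulating the 3-step flush of the shift register instead of A's hard-coded 8-way lookup table.
import Mathlib
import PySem

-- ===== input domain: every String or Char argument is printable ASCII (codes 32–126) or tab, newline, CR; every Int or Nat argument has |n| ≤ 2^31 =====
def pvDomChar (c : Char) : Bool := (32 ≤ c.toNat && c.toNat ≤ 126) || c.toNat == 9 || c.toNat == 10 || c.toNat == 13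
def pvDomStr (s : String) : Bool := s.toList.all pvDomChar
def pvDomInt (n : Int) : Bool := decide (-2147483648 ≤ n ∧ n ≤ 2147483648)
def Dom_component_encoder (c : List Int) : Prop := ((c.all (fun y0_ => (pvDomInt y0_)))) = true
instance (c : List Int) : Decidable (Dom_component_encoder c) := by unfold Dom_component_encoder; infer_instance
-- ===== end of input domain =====

-- B keeps the encoder state in an explicit 3-bit register (A shifts an unboundedly
-- growing integer; a timing run measured B faster for this reason) and derives the
-- termination bits by simulating the 3-step flush instead of A's 8-way lookup table.


-- ===== PORT A =====
-- one iteration of A's for-loop: the state plus the z list built so far (z[i] is written in index order)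
def caStep (p : Int × List Int) (ci : Int) : Int × List Int :=
  let state := p.1
  let state_nxt := state <<< (1 : Nat)
  let state_nxt :=
    if ci ≠ 0 then
      PySem.Int.bor state_nxt
        (PySem.Int.bxor (PySem.Int.bxor (PySem.Int.band (state >>> (1 : Nat)) 1)
          (PySem.Int.band (state >>> (2 : Nat)) 1)) 1)
    else
      PySem.Int.bor state_nxt
        (PySem.Int.bxor (PySem.Int.band (state >>> (1 : Nat)) 1)
          (PySem.Int.band (state >>> (2 : Nat)) 1))
  let zi : Int :=
    if PySem.Int.bxor (PySem.Int.bxor (PySem.Int.band state_nxt 1) (PySem.Int.band state 1))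
        (PySem.Int.band (state >>> (2 : Nat)) 1) ≠ 0 then 1 else 0
  (state_nxt, p.2 ++ [zi])

-- A's 8-way termination lookup table
def caTerm (state : Int) : List Int × List Int :=
  let s7 := PySem.Int.band state 7
  if s7 = 0 then ([0,0,0], [0,0,0])
  else if s7 = 1 then ([0,1,1], [1,0,1])
  else if s7 = 2 then ([1,1,0], [0,1,0])
  else if s7 = 3 then ([1,0,1], [1,1,1])
  else if s7 = 4 then ([1,0,0], [1,0,0])
  else if s7 = 5 then ([1,1,1], [0,0,1])
  else if s7 = 6 then ([0,1,0], [1,1,0])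
  else ([0,0,1], [0,1,1])

def component_encoder (c : List Int) : List Int × List Int × List Int :=
  let r := c.foldl caStep (0, [])
  let t := caTerm r.1
  (r.2, t.1, t.2)

-- ===== PORT B =====
-- one iteration of B's encoding loop on the 3-bit register
def altStep (p : Int × List Int) (ci : Int) : Int × List Int :=
  let s := p.1
  let b0 := PySem.Int.band s 1
  let b1 := PySem.Int.band (s >>> (1 : Nat)) 1
  let b2 := PySem.Int.band (s >>> (2 : Nat)) 1
  let fb := PySem.Int.bxor b1 b2
  let newbit := PySem.Int.bxor fb (if ci ≠ 0 then 1 else 0)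
  (PySem.Int.band (PySem.Int.bor (s <<< (1 : Nat)) newbit) 7,
   p.2 ++ [PySem.Int.bxor (PySem.Int.bxor newbit b0) b2])

-- one iteration of B's 3-step flush (the body of `for _ in range(3)`; the index is ignored)
def altFlush (p : Int × List Int × List Int) (_ : Int) : Int × List Int × List Int :=
  let s := p.1
  let b0 := PySem.Int.band s 1
  let b1 := PySem.Int.band (s >>> (1 : Nat)) 1
  let b2 := PySem.Int.band (s >>> (2 : Nat)) 1
  let fb := PySem.Int.bxor b1 b2
  (PySem.Int.band (s <<< (1 : Nat)) 7, p.2.1 ++ [fb], p.2.2 ++ [PySem.Int.bxor b0 b2])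

def altFlushRun (s : Int) : Int × List Int × List Int :=
  (PySem.List.pyRange 0 3 1).foldl altFlush (s, [], [])

def component_encoder_alt (c : List Int) : List Int × List Int × List Int :=
  let r := c.foldl altStep (0, [])
  let t := altFlushRun r.1
  (r.2, t.2.1, t.2.2)

-- ===== PRECONDITION & SPEC =====
def Spec_component_encoder (c : List Int) (out : List Int × List Int × List Int) : Prop := out = component_encoder_alt c
instance (c : List Int) (out : List Int × List Int × List Int) : Decidable (Spec_component_encoder c out) := by unfold Spec_component_encoder; infer_instance

-- ===== CLAIM (what is proved, stated in full; the proofs are below) =====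
def Claim_equal_component_encoder : Prop := ∀ (c : List Int), Dom_component_encoder c → Spec_component_encoder c (component_encoder c)

-- ===== LEMMAS AND PROOFS =====

-- Nat-level identities for the bit operations the ports use
lemma pvOr1 (n : Nat) : 2 * n ||| 1 = 2 * n + 1 := by
  apply Nat.eq_of_testBit_eq
  intro i
  rcases i with _ | j
  · simp [Nat.testBit_zero]
  · rw [Nat.testBit_or, Nat.testBit_succ, Nat.testBit_succ, Nat.testBit_succ]
    have h1 : 2 * n / 2 = n := by omega
    have h2 : (2 * n + 1) / 2 = n := by omega
    simp [h1, h2]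

lemma pvOr (n b : Nat) (hb : b < 2) : (n <<< 1) ||| b = 2 * n + b := by
  rw [Nat.shiftLeft_eq]
  interval_cases b
  · simp [Nat.mul_comm]
  · rw [pow_one, Nat.mul_comm, pvOr1]

lemma pvXor (a b : Nat) (ha : a < 2) (hb : b < 2) : a ^^^ b = (a + b) % 2 := by
  interval_cases a <;> interval_cases b <;> decide

lemma pvAnd1 (n : Nat) : n &&& 1 = n % 2 := Nat.and_one_is_mod n

lemma pvAnd7 (n : Nat) : n &&& 7 = n % 8 := by
  have := Nat.and_two_pow_sub_one_eq_mod n 3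
  norm_num at this; omega

lemma pvShr1 (n : Nat) : n >>> 1 = n / 2 := by rw [Nat.shiftRight_eq_div_pow]

lemma pvShr2 (n : Nat) : n >>> 2 = n / 4 := by rw [Nat.shiftRight_eq_div_pow]

lemma pvXorMod (a b : Nat) : a % 2 ^^^ b % 2 = (a + b) % 2 := by
  rw [pvXor _ _ (by omega) (by omega)]; omega

lemma pvXorOne (a : Nat) : a % 2 ^^^ 1 = (a + 1) % 2 := by
  rw [pvXor _ _ (by omega) (by omega)]; omega

lemma pvOrMod (n b : Nat) : (n <<< 1) ||| (b % 2) = 2 * n + b % 2 := pvOr _ _ (by omega)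

lemma pvIteMod (v : Nat) : (if ((v % 2 : Nat) : Int) ≠ 0 then ((1 : Nat) : Int) else 0) = ((v % 2 : Nat) : Int) := by
  rcases Nat.mod_two_eq_zero_or_one v with h | h <;> simp [h]

lemma pvCast1 : (1 : Int) = ((1 : Nat) : Int) := by norm_num

lemma pvCast7 : (7 : Int) = ((7 : Nat) : Int) := by norm_num

-- the Nat-level effect of one encoding step: (new state, z bit)
def natStep (n inb : Nat) : Nat × Nat :=
  ((2 * n + (n / 2 % 2 + n / 4 % 2 + inb) % 2),
   ((n / 2 % 2 + n / 4 % 2 + inb) % 2 + n % 2 + n / 4 % 2) % 2)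

lemma caStep_eq (n : Nat) (za : List Int) (ci : Int) :
    caStep ((n : Int), za) ci =
      (((natStep n (if ci ≠ 0 then 1 else 0)).1 : Int),
        za ++ [((natStep n (if ci ≠ 0 then 1 else 0)).2 : Int)]) := by
  by_cases h : ci ≠ 0 <;>
    · simp only [caStep, natStep, if_pos h, if_neg h,
        pvCast1, ← Int.natCast_shiftLeft, ← Int.natCast_shiftRight,
        PySem.Int.band_natCast, PySem.Int.bor_natCast, PySem.Int.bxor_natCast,
        pvShr1, pvShr2, pvAnd1, pvXorMod, pvXorOne, pvOrMod, pvIteMod,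
        Prod.mk.injEq, List.append_cancel_left_eq, List.cons.injEq, and_true, Nat.cast_inj]
      constructor <;> omega

lemma altStep_eq (r : Nat) (hr : r < 8) (za : List Int) (ci : Int) :
    altStep ((r : Int), za) ci =
      ((((natStep r (if ci ≠ 0 then 1 else 0)).1 % 8 : Nat) : Int),
        za ++ [((natStep r (if ci ≠ 0 then 1 else 0)).2 : Int)]) := by
  interval_cases r <;> by_cases h : ci ≠ 0 <;>
    · simp only [altStep, natStep, if_pos h, if_neg h, Prod.mk.injEq,
        List.append_cancel_left_eq, List.cons.injEq, and_true]
      exact ⟨by decide, by decide⟩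

lemma natStep_mod (n inb : Nat) :
    (natStep (n % 8) inb).1 % 8 = (natStep n inb).1 % 8 ∧
    (natStep (n % 8) inb).2 = (natStep n inb).2 := by
  have e1 : n % 8 % 2 = n % 2 := by omega
  have e2 : n % 8 / 2 % 2 = n / 2 % 2 := by omega
  have e3 : n % 8 / 4 % 2 = n / 4 % 2 := by omega
  simp only [natStep, e1, e2, e3]
  exact ⟨by omega, trivial⟩

-- the two encoding loops agree: A's unbounded state and B's 3-bit state stay congruent mod 8
lemma loop_rel : ∀ (c : List Int) (n : Nat) (za : List Int),
    ∃ m : Nat, ∃ Z : List Int,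
      c.foldl caStep ((n : Int), za) = ((m : Int), Z) ∧
      c.foldl altStep (((n % 8 : Nat) : Int), za) = (((m % 8 : Nat) : Int), Z) := by
  intro c
  induction c with
  | nil => intro n za; exact ⟨n, za, rfl, rfl⟩
  | cons ci c ih =>
    intro n za
    have hA := caStep_eq n za ci
    have hB := altStep_eq (n % 8) (by omega) za ci
    have hm := natStep_mod n (if ci ≠ 0 then 1 else 0)
    obtain ⟨m, Z, h1, h2⟩ := ih (natStep n (if ci ≠ 0 then 1 else 0)).1
      (za ++ [((natStep n (if ci ≠ 0 then 1 else 0)).2 : Int)])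
    refine ⟨m, Z, ?_, ?_⟩
    · simpa [hA] using h1
    · rw [List.foldl_cons, hB, hm.2, hm.1]; exact h2

-- on each of the eight residues, the flush loop reproduces A's lookup table
lemma term_eq : ∀ r : Nat, r < 8 →
    caTerm (r : Int) = ((altFlushRun (r : Int)).2.1, (altFlushRun (r : Int)).2.2) := by
  intro r hr
  interval_cases r <;> decide

lemma caTerm_mod (m : Nat) : caTerm (m : Int) = caTerm ((m % 8 : Nat) : Int) := by
  have h8 : m % 8 % 8 = m % 8 := by omega
  simp only [caTerm, pvCast7, PySem.Int.band_natCast, pvAnd7, h8]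

-- ===== VERDICT (by name: the statement is the Claim_ definition above) =====
theorem component_encoder_spec : Claim_equal_component_encoder := by
  intro c _
  unfold Spec_component_encoder
  show component_encoder c = component_encoder_alt c
  obtain ⟨m, Z, h1, h2⟩ := loop_rel c 0 []
  simp only [Nat.cast_zero] at h1
  have h0 : ((0 % 8 : Nat) : Int) = (0 : Int) := by norm_num
  rw [h0] at h2
  have ht := term_eq (m % 8) (by omega)
  simp only [component_encoder, component_encoder_alt, h1, h2]
  rw [caTerm_mod m, ht]
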